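-- pv_equiv track=rewrite | github.com/MingshanJia/explore-local-structure | networkx/algorithms/graphlets.py | get_total_number_of_types_of_hetero_ego_graphlets_for_typed_edge
-- ===== SOURCE A (Python) =====
-- from itertools import combinations_with_replacement
--
-- def get_num_of_value(T, value):
--     res = 0
--     for i in range(0, len(T)):
--         if T[i] == value:
--             res += 1
--     return res
--
-- def get_total_number_of_types_of_hetero_ego_graphlets_for_typed_edge(num_type):
--     type_list = list(range(1, num_type + 1))
--     type_list_with_zero = list(range(0, num_type + 1))
--     # No zero allowed in 2-clique, 2-path, and 3-star
--     comb_1_edge = len(list(combinations_with_replacement(type_list, 1)))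
--     comb_2_edge = len(list(combinations_with_replacement(type_list, 2)))
--     comb_3_edge = len(list(combinations_with_replacement(type_list, 3)))
--     comb_with_zero_3_edge = list(combinations_with_replacement(type_list_with_zero, 3))
--     comb_with_zero_4_edge = list(combinations_with_replacement(type_list_with_zero, 4))
--     comb_with_zero_5_edge = list(combinations_with_replacement(type_list_with_zero, 5))
--     comb_with_zero_6_edge = list(combinations_with_replacement(type_list_with_zero, 6))
--     # only one zero allowed in triangle
--     comb_with_zero_3_edge = len([x for x in comb_with_zero_3_edge if get_num_of_value(x, 0) <= 1])
--     # only one zero allowed in tailed-triangle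
--     comb_with_zero_4_edge = len([x for x in comb_with_zero_4_edge if get_num_of_value(x, 0) <= 1])
--     # only two zero allowed in 4-chordal-cycle
--     comb_with_zero_5_edge = len([x for x in comb_with_zero_5_edge if get_num_of_value(x, 0) <= 2])
--     # only three zero allowed in 4-clique
--     comb_with_zero_6_edge = len([x for x in comb_with_zero_6_edge if get_num_of_value(x, 0) <= 3])
--     return comb_1_edge + comb_2_edge + comb_3_edge + comb_with_zero_3_edge + comb_with_zero_4_edge + comb_with_zero_5_edge + comb_with_zero_6_edge
-- ===== SOURCE B (Python) =====
-- from math import comb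
--
-- def get_total_number_of_types_of_hetero_ego_graphlets_for_typed_edge(num_type):
--     n = max(num_type, 0)
--     # number of multisets of size k drawn from n symbols
--     def cwr(k):
--         return comb(n + k - 1, k)
--     # multisets of size k over n symbols plus the extra symbol 0,
--     # with at most j copies of 0: sum over z = number of zeros used
--     total = cwr(1) + cwr(2) + cwr(3)
--     for k, j in ((3, 1), (4, 1), (5, 2), (6, 3)):
--         total += sum(cwr(k - z) for z in range(j + 1))
--     return total
-- ===== Notes on version B (the rewrite author's own statement) =====
-- stated objective: faster
-- what changed: Replaces materialising all combinations_with_replacement lists and filtering them by zero-count with closed-form binomial coefficients: C(n+k-1,k) multisets of size k, and a short sum over the number of zeros used for the at-most-j-zeros counts.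
import Mathlib
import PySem

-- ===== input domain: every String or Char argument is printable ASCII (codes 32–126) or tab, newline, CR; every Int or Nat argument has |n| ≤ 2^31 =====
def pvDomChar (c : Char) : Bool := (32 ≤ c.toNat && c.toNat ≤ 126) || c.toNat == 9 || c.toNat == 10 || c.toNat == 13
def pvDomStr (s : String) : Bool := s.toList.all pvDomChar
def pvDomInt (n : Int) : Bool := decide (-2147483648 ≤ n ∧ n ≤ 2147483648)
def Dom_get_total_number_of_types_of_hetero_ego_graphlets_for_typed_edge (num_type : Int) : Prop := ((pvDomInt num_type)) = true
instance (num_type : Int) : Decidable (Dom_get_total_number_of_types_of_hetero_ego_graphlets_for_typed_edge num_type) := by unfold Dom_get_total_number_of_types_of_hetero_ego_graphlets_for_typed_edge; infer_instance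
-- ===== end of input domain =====

-- B replaces the enumeration-and-filter of all combinations_with_replacement by closed-form
-- binomial-coefficient sums (objective: faster, asymptotic).

-- ===== PORT A =====
-- itertools.combinations_with_replacement(pool, k), in Python's lexicographic order
def pvCwr : List Int → Nat → List (List Int)
  | _, 0 => [[]]
  | [], _ + 1 => []
  | x :: xs, k + 1 => (pvCwr (x :: xs) k).map (fun t => x :: t) ++ pvCwr xs (k + 1)
termination_by pool k => (k, pool.length)
decreasing_by
  · exact Prod.Lex.left _ _ (Nat.lt_succ_self k)
  · exact Prod.Lex.right _ (by simp)

def get_num_of_value (T : List Int) (value : Int) : Int :=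
  (PySem.List.pyRange 0 (T.length : Int) 1).foldl
    (fun res i => if PySem.List.pyGetD T i 0 = value then res + 1 else res) 0

def get_total_number_of_types_of_hetero_ego_graphlets_for_typed_edge (num_type : Int) : Int :=
  let type_list := PySem.List.pyRange 1 (num_type + 1) 1
  let type_list_with_zero := PySem.List.pyRange 0 (num_type + 1) 1
  let comb_1_edge := (pvCwr type_list 1).length
  let comb_2_edge := (pvCwr type_list 2).length
  let comb_3_edge := (pvCwr type_list 3).length
  let comb_with_zero_3_edge :=
    ((pvCwr type_list_with_zero 3).filter (fun x => get_num_of_value x 0 ≤ 1)).length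
  let comb_with_zero_4_edge :=
    ((pvCwr type_list_with_zero 4).filter (fun x => get_num_of_value x 0 ≤ 1)).length
  let comb_with_zero_5_edge :=
    ((pvCwr type_list_with_zero 5).filter (fun x => get_num_of_value x 0 ≤ 2)).length
  let comb_with_zero_6_edge :=
    ((pvCwr type_list_with_zero 6).filter (fun x => get_num_of_value x 0 ≤ 3)).length
  ((comb_1_edge + comb_2_edge + comb_3_edge + comb_with_zero_3_edge + comb_with_zero_4_edge
    + comb_with_zero_5_edge + comb_with_zero_6_edge : Nat) : Int)

-- ===== PORT B =====
def get_total_number_of_types_of_hetero_ego_graphlets_for_typed_edge_alt (num_type : Int) : Int :=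
  let n := (max num_type 0).toNat
  let cwrCount := fun (k : Nat) => Nat.choose (n + k - 1) k
  let base := cwrCount 1 + cwrCount 2 + cwrCount 3
  let total := [(3, 1), (4, 1), (5, 2), (6, 3)].foldl
    (fun acc (p : Nat × Nat) =>
      acc + (List.range (p.2 + 1)).foldl (fun s z => s + cwrCount (p.1 - z)) 0) base
  (total : Int)

-- ===== PRECONDITION & SPEC =====
def Spec_get_total_number_of_types_of_hetero_ego_graphlets_for_typed_edge (num_type : Int) (out : Int) : Prop := out = get_total_number_of_types_of_hetero_ego_graphlets_for_typed_edge_alt num_type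
instance (num_type : Int) (out : Int) : Decidable (Spec_get_total_number_of_types_of_hetero_ego_graphlets_for_typed_edge num_type out) := by unfold Spec_get_total_number_of_types_of_hetero_ego_graphlets_for_typed_edge; infer_instance

-- ===== CLAIM (what is proved, stated in full; the proofs are below) =====
def Claim_equal_get_total_number_of_types_of_hetero_ego_graphlets_for_typed_edge : Prop := ∀ (num_type : Int), Dom_get_total_number_of_types_of_hetero_ego_graphlets_for_typed_edge num_type → Spec_get_total_number_of_types_of_hetero_ego_graphlets_for_typed_edge num_type (get_total_number_of_types_of_hetero_ego_graphlets_for_typed_edge num_type)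


-- ===== LEMMAS AND PROOFS =====

theorem pvCwr_length (pool : List Int) (k : Nat) :
    (pvCwr pool k).length = Nat.choose (pool.length + k - 1) k := by
  fun_induction pvCwr pool k with
  | case1 p => simp
  | case2 k => simp
  | case3 x xs k ih1 ih2 =>
    simp only [List.length_append, List.length_map, ih1, ih2, List.length_cons]
    have h1 : xs.length + 1 + k - 1 = xs.length + k := by omega
    have h2 : xs.length + (k + 1) - 1 = xs.length + k := by omega
    have h3 : xs.length + 1 + (k + 1) - 1 = xs.length + k + 1 := by omega
    rw [h1, h2, h3, Nat.choose_succ_succ]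

theorem pvCwr_mem (pool : List Int) (k : Nat) :
    ∀ t ∈ pvCwr pool k, ∀ a ∈ t, a ∈ pool := by
  fun_induction pvCwr pool k with
  | case1 p => intro t ht; simp at ht; simp [ht]
  | case2 k => intro t ht; simp at ht
  | case3 x xs k ih1 ih2 =>
    intro t ht
    simp only [List.mem_append, List.mem_map] at ht
    rcases ht with ⟨u, hu, rfl⟩ | hB
    · intro a ha
      rcases List.mem_cons.mp ha with rfl | ha
      · exact List.mem_cons_self
      · exact ih1 u hu a ha
    · intro a ha
      exact List.mem_cons_of_mem x (ih2 t hB a ha)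

theorem get_num_of_value_eq_count (T : List Int) (v : Int) :
    get_num_of_value T v = (T.count v : Int) := by
  unfold get_num_of_value
  rw [PySem.List.foldl_pyRange_zero_pyGetD' T 0
    (fun res x => if x = v then res + 1 else res) 0]
  have : ∀ (l : List Int) (c : Int),
      l.foldl (fun res x => if x = v then res + 1 else res) c = c + (l.count v : Nat) := by
    intro l
    induction l with
    | nil => intro c; simp
    | cons a l ih =>
      intro c
      by_cases h : a = v
      · simp [h, ih, List.count_cons_self]
        ring
      · simp [List.foldl_cons, if_neg h, ih, List.count_cons_of_ne (by simpa using h)]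
  simpa using this T 0

theorem pvCwr_filter_length (x : Int) (xs : List Int) (hx : x ∉ xs) :
    ∀ (k j : Nat), j ≤ k →
    ((pvCwr (x :: xs) k).filter (fun t => t.count x ≤ j)).length
      = ((List.range (j + 1)).map
          (fun z => Nat.choose (xs.length + (k - z) - 1) (k - z))).sum := by
  intro k
  induction k with
  | zero =>
    intro j hj
    interval_cases j
    simp [pvCwr]
  | succ k ih =>
    intro j hj
    show ((pvCwr (x :: xs) (k + 1)).filter (fun t => t.count x ≤ j)).length = _
    rw [show pvCwr (x :: xs) (k + 1)
        = (pvCwr (x :: xs) k).map (fun t => x :: t) ++ pvCwr xs (k + 1) from by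
      simp only [pvCwr]]
    rw [List.filter_append, List.length_append, List.filter_map]
    have hB : (pvCwr xs (k + 1)).filter (fun t => t.count x ≤ j) = pvCwr xs (k + 1) := by
      apply List.filter_eq_self.mpr
      intro t ht
      have : t.count x = 0 := by
        apply List.count_eq_zero.mpr
        intro hxin
        exact hx (pvCwr_mem xs (k + 1) t ht x hxin)
      simp [this]
    have hBlen : (pvCwr xs (k + 1)).length = Nat.choose (xs.length + (k + 1) - 1) (k + 1) :=
      pvCwr_length xs (k + 1)
    have hpred : ((fun t => decide (t.count x ≤ j)) ∘ (fun t => x :: t))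
        = fun t : List Int => decide (t.count x + 1 ≤ j) := by
      funext t; simp [List.count_cons_self]
    rw [hB, hBlen, hpred]
    cases j with
    | zero =>
      have : (fun t : List Int => decide (t.count x + 1 ≤ 0)) = fun _ => false := by
        funext t; simp
      rw [this]
      simp
    | succ j' =>
      have hpred2 : (fun t : List Int => decide (t.count x + 1 ≤ j' + 1))
          = fun t : List Int => decide (t.count x ≤ j') := by
        funext t; simp
      rw [hpred2, List.length_map, ih j' (by omega)]
      have hRHS : ((List.range (j' + 1 + 1)).map
            (fun z => Nat.choose (xs.length + (k + 1 - z) - 1) (k + 1 - z))).sum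
          = Nat.choose (xs.length + (k + 1) - 1) (k + 1)
            + ((List.range (j' + 1)).map
                (fun z => Nat.choose (xs.length + (k - z) - 1) (k - z))).sum := by
        rw [List.range_succ_eq_map, List.map_cons, List.map_map, List.sum_cons]
        congr 1
        have : ((fun z => Nat.choose (xs.length + (k + 1 - z) - 1) (k + 1 - z)) ∘ Nat.succ)
            = fun z => Nat.choose (xs.length + (k - z) - 1) (k - z) := by
          funext z; simp [Nat.succ_sub_succ]
        rw [this]
      rw [hRHS]
      omega

-- ===== VERDICT (by name: the statement is the Claim_ definition above) =====
theorem get_total_number_of_types_of_hetero_ego_graphlets_for_typed_edge_spec : Claim_equal_get_total_number_of_types_of_hetero_ego_graphlets_for_typed_edge := by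
  intro num_type _
  unfold Spec_get_total_number_of_types_of_hetero_ego_graphlets_for_typed_edge get_total_number_of_types_of_hetero_ego_graphlets_for_typed_edge get_total_number_of_types_of_hetero_ego_graphlets_for_typed_edge_alt
  dsimp only
  rcases lt_or_ge num_type 0 with hneg | hpos
  · -- num_type < 0 : both ranges are empty, both sides are 0
    rw [PySem.List.pyRange_one_eq_nil (by omega), PySem.List.pyRange_one_eq_nil (by omega)]
    have hmax : max num_type 0 = 0 := by omega
    rw [hmax]
    simp [pvCwr]
  · -- 0 ≤ num_type
    set n : Nat := num_type.toNat with hn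
    have hnum : (n : Int) = num_type := Int.toNat_of_nonneg hpos
    have hz : PySem.List.pyRange 0 (num_type + 1) 1
        = 0 :: PySem.List.pyRange 1 (num_type + 1) 1 :=
      PySem.List.pyRange_one_cons (by omega)
    have hlen : (PySem.List.pyRange 1 (num_type + 1) 1).length = n := by
      rw [PySem.List.length_pyRange_one]; omega
    have hnotmem : (0 : Int) ∉ PySem.List.pyRange 1 (num_type + 1) 1 := by
      rw [PySem.List.mem_pyRange_one]; omega
    have hmax : (max num_type 0).toNat = n := by omega
    have hpredj : ∀ (j : Nat) (t : List Int),
        (decide (get_num_of_value t 0 ≤ (j : Int))) = decide (t.count 0 ≤ j) := by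
      intro j t
      rw [decide_eq_decide, get_num_of_value_eq_count]
      exact_mod_cast Iff.rfl
    have hfilt : ∀ (k j : Nat), j ≤ k →
        ((pvCwr (PySem.List.pyRange 0 (num_type + 1) 1) k).filter
            (fun t => get_num_of_value t 0 ≤ (j : Int))).length
          = ((List.range (j + 1)).map
              (fun z => Nat.choose (n + (k - z) - 1) (k - z))).sum := by
      intro k j hj
      rw [hz]
      have : (fun t : List Int => decide (get_num_of_value t 0 ≤ (j : Int)))
          = fun t : List Int => decide (t.count 0 ≤ j) := by
        funext t; exact hpredj j t
      rw [this, pvCwr_filter_length 0 _ hnotmem k j hj, hlen]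
    have h3 := hfilt 3 1 (by omega)
    have h4 := hfilt 4 1 (by omega)
    have h5 := hfilt 5 2 (by omega)
    have h6 := hfilt 6 3 (by omega)
    simp only [show ((1 : Nat) : Int) = (1 : Int) from rfl,
      show ((2 : Nat) : Int) = (2 : Int) from rfl,
      show ((3 : Nat) : Int) = (3 : Int) from rfl] at h3 h4 h5 h6
    rw [h3, h4, h5, h6, pvCwr_length, pvCwr_length, pvCwr_length, hlen, hmax]
    simp [List.range_succ, List.foldl]
    ring
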